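-- pv_equiv track=rewrite | github.com/PolinaDmitr/Classes | example/23/lesson/23_6.py | f
-- ===== SOURCE A (Python) =====
-- def f(x, y, c):
--     if x > y or (x in (8, 16, 32) and c):
--         return 0
--     if x in (8, 16, 32):
--         c = True
--     if x == y and c:
--         return 1
--     return f(x + 1, y, c) + f(x + 4, y, c) + f(x * 2, y, c)
-- ===== SOURCE B (Python) =====
-- def f(x, y, c):
--     # Bottom-up DP over states (v, cc) for v in [x..y]; same recurrence, each state computed once.
--     special = x in (8, 16, 32)
--     if x > y or (special and c):
--         return 0
--     if x == y:
--         return 1 if (c or special) else 0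
--     memo = {}
--     def get(v, cc):
--         if v > y:
--             return 0
--         return memo[(v, cc)]
--     for v in range(y, x - 1, -1):
--         if v in (8, 16, 32):
--             memo[(v, True)] = 0
--             memo[(v, False)] = 1 if v == y else get(v + 1, True) + get(v + 4, True) + get(v * 2, True)
--         else:
--             memo[(v, True)] = 1 if v == y else get(v + 1, True) + get(v + 4, True) + get(v * 2, True)
--             memo[(v, False)] = get(v + 1, False) + get(v + 4, False) + get(v * 2, False)
--     return get(x, c)
-- ===== Notes on version B (the rewrite author's own statement) =====
-- stated objective: faster
-- what changed: replaces the exponential three-way recursion by a bottom-up dynamic program that tabulates each state (v, c) for v from y down to x exactly once in a dictionary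
import Mathlib
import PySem

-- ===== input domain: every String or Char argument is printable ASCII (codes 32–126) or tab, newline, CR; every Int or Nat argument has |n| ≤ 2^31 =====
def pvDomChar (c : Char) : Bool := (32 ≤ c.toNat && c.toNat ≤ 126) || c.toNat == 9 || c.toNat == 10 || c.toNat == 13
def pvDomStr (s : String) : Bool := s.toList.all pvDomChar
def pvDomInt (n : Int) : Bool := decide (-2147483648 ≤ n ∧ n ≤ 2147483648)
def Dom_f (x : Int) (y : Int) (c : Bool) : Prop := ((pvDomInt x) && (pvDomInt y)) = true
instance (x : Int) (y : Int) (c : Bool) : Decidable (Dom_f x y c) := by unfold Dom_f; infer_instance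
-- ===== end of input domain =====

-- B replaces A's exponential three-way recursion by a bottom-up DP table over the states (v, c).

-- ===== PORT A =====
-- A's recursion diverges when x ≤ 0 ≤ y - x except at x = y with c' = true; ported with fuel
-- (y + 1 - x).toNat + 1, which is enough on Pre_f (proved below); fuel-out value 0 is never reached on Pre_f.
def fAux : Nat → Int → Int → Bool → Int
  | 0, _, _, _ => 0
  | Nat.succ n, x, y, c =>
    if x > y ∨ ((x = 8 ∨ x = 16 ∨ x = 32) ∧ c = true) then 0
    else
      let c' : Bool := if x = 8 ∨ x = 16 ∨ x = 32 then true else c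
      if x = y ∧ c' = true then 1
      else fAux n (x + 1) y c' + fAux n (x + 4) y c' + fAux n (x * 2) y c'

def f (x : Int) (y : Int) (c : Bool) : Int := fAux ((y + 1 - x).toNat + 1) x y c

-- ===== PORT B =====
-- get(v, cc): 0 above y, else the memo entry (KeyError is unreachable under Pre_f; getD 0 is the total form)
def fAltGet (y : Int) (memo : PySem.Dict (Int × Bool) Int) (v : Int) (cc : Bool) : Int :=
  if v > y then 0 else memo.getD (v, cc) 0

-- one iteration of B's loop body for the current v
def fAltStep (y : Int) (memo : PySem.Dict (Int × Bool) Int) (v : Int) : PySem.Dict (Int × Bool) Int :=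
  if v = 8 ∨ v = 16 ∨ v = 32 then
    let m1 := memo.insert (v, true) 0
    m1.insert (v, false)
      (if v = y then 1 else fAltGet y m1 (v + 1) true + fAltGet y m1 (v + 4) true + fAltGet y m1 (v * 2) true)
  else
    let m1 := memo.insert (v, true)
      (if v = y then 1 else fAltGet y memo (v + 1) true + fAltGet y memo (v + 4) true + fAltGet y memo (v * 2) true)
    m1.insert (v, false)
      (fAltGet y m1 (v + 1) false + fAltGet y m1 (v + 4) false + fAltGet y m1 (v * 2) false)

def f_alt (x : Int) (y : Int) (c : Bool) : Int :=
  if x > y ∨ ((x = 8 ∨ x = 16 ∨ x = 32) ∧ c = true) then 0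
  else if x = y then (if c = true ∨ x = 8 ∨ x = 16 ∨ x = 32 then 1 else 0)
  else
    let memo := (PySem.List.pyRange y (x - 1) (-1)).foldl (fAltStep y) PySem.Dict.empty
    fAltGet y memo x c

-- ===== PRECONDITION & SPEC =====
-- Pre_f excludes exactly the inputs on which A's recursion never terminates (RecursionError in
-- Python): x ≤ 0 with x < y, or x = y ≤ 0 with c false (the x*2 / x+1 branches loop forever there).
def Pre_f (x : Int) (y : Int) (c : Bool) : Prop := 1 ≤ x ∨ y < x ∨ (x = y ∧ c = true)
instance (x : Int) (y : Int) (c : Bool) : Decidable (Pre_f x y c) := by unfold Pre_f; infer_instance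
def pvWitness_f : Int × Int × Bool := (1, 10, false)
def Spec_f (x : Int) (y : Int) (c : Bool) (out : Int) : Prop := out = f_alt x y c
instance (x : Int) (y : Int) (c : Bool) (out : Int) : Decidable (Spec_f x y c out) := by unfold Spec_f; infer_instance

-- ===== CLAIM (what is proved, stated in full; the proofs are below) =====
def Claim_equal_f : Prop := ∀ (x : Int) (y : Int) (c : Bool), Dom_f x y c → Pre_f x y c → Spec_f x y c (f x y c)

-- ===== LEMMAS AND PROOFS =====

-- fuel irrelevance: any fuel beyond the measure gives the same value (for 1 ≤ x)
lemma fAux_irrel : ∀ (n m : Nat) (x y : Int) (c : Bool), 1 ≤ x →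
    (y + 1 - x).toNat < n → (y + 1 - x).toNat < m → fAux n x y c = fAux m x y c := by
  intro n
  induction n with
  | zero => intro m x y c _ hn _; omega
  | succ n ih =>
    intro m x y c hx hn hm
    cases m with
    | zero => omega
    | succ m =>
      simp only [fAux]
      split
      · rfl
      · rename_i hguard
        have hxy : x ≤ y := by
          by_contra h
          exact hguard (Or.inl (by omega))
        split
        all_goals
          split
          · rfl
          · rw [ih m (x + 1) y _ (by omega) (by omega) (by omega),
                ih m (x + 4) y _ (by omega) (by omega) (by omega),
                ih m (x * 2) y _ (by omega) (by omega) (by omega)]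

-- A returns 0 whenever its top guard fires (any x)
lemma f_guard {x y : Int} {c : Bool} (h : x > y ∨ ((x = 8 ∨ x = 16 ∨ x = 32) ∧ c = true)) :
    f x y c = 0 := by
  unfold f fAux
  simp [h]

lemma f_gt {x y : Int} (h : y < x) (c : Bool) : f x y c = 0 :=
  f_guard (Or.inl h)

-- one-step unfolding of A (valid for 1 ≤ x)
lemma f_eq (x y : Int) (c : Bool) (hx : 1 ≤ x) :
    f x y c =
      if x > y ∨ ((x = 8 ∨ x = 16 ∨ x = 32) ∧ c = true) then 0
      else
        let c' : Bool := if x = 8 ∨ x = 16 ∨ x = 32 then true else c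
        if x = y ∧ c' = true then 1
        else f (x + 1) y c' + f (x + 4) y c' + f (x * 2) y c' := by
  conv_lhs => rw [f]
  rw [fAux]
  split
  · rfl
  · rename_i hguard
    have hxy : x ≤ y := by
      by_contra h
      exact hguard (Or.inl (by omega))
    simp only []
    split
    all_goals
      split
      · rfl
      · unfold f
        rw [fAux_irrel ((y + 1 - x).toNat) ((y + 1 - (x + 1)).toNat + 1) (x + 1) y _
              (by omega) (by omega) (by omega),
            fAux_irrel ((y + 1 - x).toNat) ((y + 1 - (x + 4)).toNat + 1) (x + 4) y _
              (by omega) (by omega) (by omega),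
            fAux_irrel ((y + 1 - x).toNat) ((y + 1 - x * 2).toNat + 1) (x * 2) y _
              (by omega) (by omega) (by omega)]

-- the memo invariant: all states (u, cc) with lo ≤ u ≤ y hold A's value
def Good (y : Int) (memo : PySem.Dict (Int × Bool) Int) (lo : Int) : Prop :=
  ∀ (u : Int) (cc : Bool), lo ≤ u → u ≤ y → memo.get? (u, cc) = some (f u y cc)

lemma get_of_good {y : Int} {memo : PySem.Dict (Int × Bool) Int} {lo : Int}
    (hg : Good y memo lo) {u : Int} (hu : lo ≤ u) (cc : Bool) :
    fAltGet y memo u cc = f u y cc := by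
  unfold fAltGet
  split
  · exact (f_gt (by omega) cc).symm
  · rename_i h
    have := hg u cc hu (by omega)
    simp [PySem.Dict.getD, this]

lemma good_insert {y : Int} {memo : PySem.Dict (Int × Bool) Int} {lo v : Int} {cc : Bool} {w : Int}
    (hg : Good y memo lo) (hv : v < lo) :
    Good y (memo.insert (v, cc) w) lo := by
  intro u cc' hu hy
  rw [PySem.Dict.get?_insert_of_ne _ _ (by intro h; injection h with h1 _; omega)]
  exact hg u cc' hu hy

lemma step_good {y x v : Int} {memo : PySem.Dict (Int × Bool) Int}
    (hx : 1 ≤ x) (hxv : x ≤ v) (hvy : v ≤ y) (hg : Good y memo (v + 1)) :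
    Good y (fAltStep y memo v) v := by
  have hv1 : 1 ≤ v := by omega
  have hyv : ¬ (v > y) := by omega
  intro u cc hu hy2
  rcases eq_or_lt_of_le hu with h | h
  · subst h
    unfold fAltStep
    split
    · rename_i hsp
      cases cc with
      | true =>
        rw [PySem.Dict.get?_insert_of_ne _ _ (by simp), PySem.Dict.get?_insert_self]
        have h0 : f v y true = 0 := by
          rw [f_eq v y true hv1]
          simp [hsp]
        rw [h0]
      | false =>
        rw [PySem.Dict.get?_insert_self]
        congr 1
        have hg1 : Good y (memo.insert (v, true) 0) (v + 1) := good_insert hg (by omega)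
        rw [get_of_good hg1 (by omega), get_of_good hg1 (by omega), get_of_good hg1 (by omega),
            f_eq v y false hv1]
        simp [hsp, hyv]
    · rename_i hsp
      cases cc with
      | true =>
        rw [PySem.Dict.get?_insert_of_ne _ _ (by simp), PySem.Dict.get?_insert_self]
        congr 1
        rw [get_of_good hg (by omega), get_of_good hg (by omega), get_of_good hg (by omega),
            f_eq v y true hv1]
        simp [hsp, hyv]
      | false =>
        rw [PySem.Dict.get?_insert_self]
        congr 1
        have hg1 : Good y (memo.insert (v, true)
            (if v = y then 1 else fAltGet y memo (v + 1) true + fAltGet y memo (v + 4) true +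
              fAltGet y memo (v * 2) true)) (v + 1) := good_insert hg (by omega)
        rw [get_of_good hg1 (by omega), get_of_good hg1 (by omega), get_of_good hg1 (by omega),
            f_eq v y false hv1]
        simp [hsp, hyv]
  · unfold fAltStep
    split
    · exact (good_insert (good_insert hg (by omega)) (by omega)) u cc (by omega) hy2
    · exact (good_insert (good_insert hg (by omega)) (by omega)) u cc (by omega) hy2

lemma loop_inv (x y : Int) (hx : 1 ≤ x) : ∀ (n : Nat) (v : Int) (memo : PySem.Dict (Int × Bool) Int),
    v ≤ y → v - (x - 1) = n → Good y memo (v + 1) →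
    Good y ((PySem.List.pyRange v (x - 1) (-1)).foldl (fAltStep y) memo) x := by
  intro n
  induction n with
  | zero =>
    intro v memo _ hn hg
    rw [PySem.List.pyRange_neg_one_eq_nil (by omega)]
    simpa [show v + 1 = x from by omega] using hg
  | succ n ih =>
    intro v memo hvy hn hg
    rw [PySem.List.pyRange_neg_one_cons (by omega)]
    simp only [List.foldl_cons]
    exact ih (v - 1) _ (by omega) (by omega)
      (by simpa [show v - 1 + 1 = v from by omega] using step_good hx (by omega) hvy hg)

lemma good_empty (y v : Int) (h : y < v) : Good y PySem.Dict.empty v := by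
  intro u cc hu hy
  omega

-- ===== VERDICT (by name: the statement is the Claim_ definition above) =====
theorem f_spec : Claim_equal_f := by
  intro x y c _ hpre
  unfold Spec_f f_alt
  split
  · rename_i hguard
    exact f_guard hguard
  · rename_i hguard
    have hxy : x ≤ y := by
      by_contra h
      exact hguard (Or.inl (by omega))
    split
    · rename_i heq
      subst heq
      by_cases hsp : x = 8 ∨ x = 16 ∨ x = 32
      · -- special x: guard failing means c = false; c' = true so A returns 1
        have hc : c = false := by
          cases c
          · rfl
          · exact absurd (Or.inr ⟨hsp, rfl⟩) hguard
        have hx1 : 1 ≤ x := by rcases hsp with h | h | h <;> omega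
        rw [f_eq x x c hx1]
        simp [hsp, hc]
      · -- non-special x: c' = c
        cases hcc : c with
        | true =>
          -- f returns 1 directly from the base case, any x
          unfold f fAux
          simp [hsp]
        | false =>
          -- Pre gives 1 ≤ x here; children all exceed y = x
          have hx1 : 1 ≤ x := by
            rcases hpre with h | h | ⟨_, h⟩
            · exact h
            · omega
            · simp [hcc] at h
          rw [f_eq x x false hx1]
          simp only [hsp]
          rw [f_gt (by omega), f_gt (by omega), f_gt (by omega)]
          simp
    · rename_i hne
      have hx1 : 1 ≤ x := by
        rcases hpre with h | h | ⟨h, _⟩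
        · exact h
        · omega
        · exact absurd h hne
      have hgood := loop_inv x y hx1 (y - (x - 1)).toNat y PySem.Dict.empty (le_refl y)
        (by omega) (good_empty y (y + 1) (by omega))
      exact (get_of_good hgood (le_refl x) c).symm
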